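-- pv_equiv track=rewrite | github.com/partyrobotics/bartendro | ui/bartendro/master/pack7.py | pack_7bit
-- ===== SOURCE A (Python) =====
-- def pack_7bit(data):
--     buffer = 0
--     bitcount = 0
--     out = ""
--
--     while True:
--         if bitcount < 7:
--             buffer <<= 8
--             buffer |= ord(data[0])
--             data = data[1:]
--             bitcount += 8
--         out += chr(buffer >> (bitcount - 7))
--         buffer &= (1 << (bitcount - 7)) - 1
--         bitcount -= 7
--
--         if len(data) == 0: break
--
--     out += chr(buffer)
--     return out
-- ===== SOURCE B (Python) =====
-- def pack_7bit(data):
--     # Closed-form repack: accumulate all bytes into one big integer, then slice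
--     # fixed 7-bit chunks off the top and finish with the (len-1)%7+1 low bits.
--     n = len(data)
--     value = 0
--     for c in data:
--         value = (value << 8) | ord(c)
--     r = (n - 1) % 7 + 1
--     num = (8 * n - r) // 7
--     out = [chr((value >> (8 * n - 7 * (i + 1))) & 0x7f) for i in range(num)]
--     out.append(chr(value & ((1 << r) - 1)))
--     return "".join(out)
-- ===== Notes on version B (the rewrite author's own statement) =====
-- stated objective: alternative
-- what changed: Replaces A's stateful bit-buffer/bitcount while-loop with a closed form: the whole input is accumulated into one big integer and the output positions are computed arithmetically (num full 7-bit chunks sliced from the top, then the final (n-1)%7+1 low bits); slower on large inputs.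
-- outside the precondition, e.g. on pack_7bit(''): A raises IndexError, B returns '\x00'
import Mathlib
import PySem

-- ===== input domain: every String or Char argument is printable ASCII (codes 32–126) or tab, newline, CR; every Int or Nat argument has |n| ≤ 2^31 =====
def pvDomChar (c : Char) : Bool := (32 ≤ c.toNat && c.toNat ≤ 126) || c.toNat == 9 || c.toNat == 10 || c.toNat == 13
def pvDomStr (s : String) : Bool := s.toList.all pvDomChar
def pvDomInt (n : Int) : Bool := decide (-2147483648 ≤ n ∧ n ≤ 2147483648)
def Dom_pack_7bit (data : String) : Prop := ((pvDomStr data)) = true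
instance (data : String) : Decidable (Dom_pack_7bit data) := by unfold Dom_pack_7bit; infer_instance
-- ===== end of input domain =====

-- B repacks the bytes by closed-form arithmetic on one accumulated big integer instead of A's
-- stateful bit-buffer loop (objective: alternative; return values proved equal on nonempty input).

-- ===== PORT A =====
-- A's while-True loop over (buffer, bitcount, data, out).  data[0] is read only when the loop
-- is entered with nonempty data (guaranteed by Pre_ at the initial call; thereafter the loop
-- breaks before data becomes empty), so headD's default is never used on admitted inputs.
def packLoop (buffer : Nat) (bitcount : Nat) (data : List Char) (out : List Char) : List Char :=
  if _h : bitcount < 7 then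
    -- if bitcount < 7: buffer <<= 8; buffer |= ord(data[0]); data = data[1:]; bitcount += 8
    let buffer1 := (buffer <<< 8) ||| (data.headD (Char.ofNat 0)).toNat
    let bitcount1 := bitcount + 8
    -- out += chr(buffer >> (bitcount - 7)); buffer &= (1 << (bitcount - 7)) - 1; bitcount -= 7
    let out1 := out ++ [Char.ofNat (buffer1 >>> (bitcount1 - 7))]
    let buffer2 := buffer1 &&& ((1 <<< (bitcount1 - 7)) - 1)
    let bitcount2 := bitcount1 - 7
    if _h2 : data.tail.length = 0 then out1 ++ [Char.ofNat buffer2]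
    else packLoop buffer2 bitcount2 data.tail out1
  else
    let out1 := out ++ [Char.ofNat (buffer >>> (bitcount - 7))]
    let buffer2 := buffer &&& ((1 <<< (bitcount - 7)) - 1)
    let bitcount2 := bitcount - 7
    if _h2 : data.length = 0 then out1 ++ [Char.ofNat buffer2]
    else packLoop buffer2 bitcount2 data out1
termination_by 8 * data.length + bitcount
decreasing_by
  · have ht : data.tail.length = data.length - 1 := by simp
    omega
  · omega

def pack_7bit (data : String) : String :=
  String.mk (packLoop 0 0 data.toList [])

-- ===== PORT B =====
-- port of Source B: value = fold of (value << 8) | ord(c); then closed-form chunk extraction.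
-- Nat arithmetic is exact for Python's here because every quantity Source B computes is
-- nonnegative and no Python subtraction goes negative when the input is nonempty (Pre_).
def pack_7bit_alt (data : String) : String :=
  let n := data.toList.length
  let value := data.toList.foldl (fun value c => (value <<< 8) ||| c.toNat) 0
  let r := (n - 1) % 7 + 1
  let num := (8 * n - r) / 7
  let chunks := (List.range num).map (fun i => Char.ofNat ((value >>> (8 * n - 7 * (i + 1))) &&& 0x7f))
  String.mk (chunks ++ [Char.ofNat (value &&& ((1 <<< r) - 1))])

-- ===== PRECONDITION & SPEC =====
-- Pre_ excludes exactly the empty string, on which A raises IndexError (data[0]).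
def Pre_pack_7bit (data : String) : Prop := data.toList ≠ []
instance (data : String) : Decidable (Pre_pack_7bit data) := by unfold Pre_pack_7bit; infer_instance
def pvWitness_pack_7bit : String := "a"

def Spec_pack_7bit (data : String) (out : String) : Prop := out = pack_7bit_alt data
instance (data : String) (out : String) : Decidable (Spec_pack_7bit data out) := by unfold Spec_pack_7bit; infer_instance

-- ===== CLAIM (what is proved, stated in full; the proofs are below) =====
def Claim_equal_pack_7bit : Prop := ∀ (data : String), Dom_pack_7bit data → Pre_pack_7bit data → Spec_pack_7bit data (pack_7bit data)

-- ===== LEMMAS AND PROOFS =====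

-- big-endian accumulator shared by the analysis of both ports
def pvAcc (b : Nat) (l : List Char) : Nat :=
  l.foldl (fun v c => (v <<< 8) ||| c.toNat) b

-- the closed-form emission, parametrised by the total bit count T
def pvEmit (V T : Nat) : List Char :=
  (List.range ((T - ((T - 1) % 7 + 1)) / 7)).map
      (fun i => Char.ofNat ((V >>> (T - 7 * (i + 1))) &&& 0x7f))
    ++ [Char.ofNat (V &&& ((1 <<< ((T - 1) % 7 + 1)) - 1))]

lemma pv_shl8_or (a b : Nat) (h : b < 2 ^ 8) : (a <<< 8) ||| b = 2 ^ 8 * a + b := by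
  apply Nat.eq_of_testBit_eq
  intro i
  rw [Nat.testBit_two_pow_mul_add a h i, Nat.testBit_lor, Nat.testBit_shiftLeft]
  by_cases hi : i < 8
  · simp [hi, Nat.not_le.mpr hi]
  · have hb : b < 2 ^ i :=
      lt_of_lt_of_le h (Nat.pow_le_pow_right (by norm_num) (Nat.le_of_not_lt hi))
    simp [hi, Nat.le_of_not_lt hi, Nat.testBit_lt_two_pow hb]

lemma pv_andMod (x k : Nat) : x &&& ((1 <<< k) - 1) = x % 2 ^ k := by
  rw [Nat.one_shiftLeft]
  exact Nat.and_two_pow_sub_one_eq_mod x k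

lemma pvAcc_split (l : List Char) : ∀ b, (∀ c ∈ l, c.toNat < 2 ^ 8) →
    pvAcc b l = 2 ^ (8 * l.length) * b + pvAcc 0 l ∧ pvAcc 0 l < 2 ^ (8 * l.length) := by
  induction l with
  | nil => intro b _; simp [pvAcc]
  | cons c t ih =>
    intro b hchars
    have hc : c.toNat < 2 ^ 8 := hchars c (List.mem_cons_self)
    have hstep : ∀ a : Nat, pvAcc a (c :: t) = pvAcc (2 ^ 8 * a + c.toNat) t := by
      intro a
      simp only [pvAcc, List.foldl_cons, pv_shl8_or a c.toNat hc]
    have ht := fun a => ih a (fun x hx => hchars x (List.mem_cons_of_mem _ hx))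
    obtain ⟨hb, hlt⟩ := ht (2 ^ 8 * b + c.toNat)
    obtain ⟨h0, _⟩ := ht c.toNat
    have hzero : pvAcc 0 (c :: t) = 2 ^ (8 * t.length) * c.toNat + pvAcc 0 t := by
      rw [hstep 0]; simpa using h0
    have hpow : 2 ^ (8 * (c :: t).length) = 2 ^ (8 * t.length) * 2 ^ 8 := by
      rw [List.length_cons, show 8 * (t.length + 1) = 8 * t.length + 8 from by ring, pow_add]
    constructor
    · rw [hstep b, hb, hzero, hpow]; ring
    · rw [hzero, hpow]
      calc 2 ^ (8 * t.length) * c.toNat + pvAcc 0 t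
          < 2 ^ (8 * t.length) * (c.toNat + 1) := by
            rw [Nat.mul_succ]; exact Nat.add_lt_add_left hlt _
        _ ≤ 2 ^ (8 * t.length) * 2 ^ 8 := Nat.mul_le_mul_left _ hc

lemma pv_mod_shr_and (V s m : Nat) (h : s + 7 ≤ m) :
    ((V % 2 ^ m) >>> s) &&& 0x7f = (V >>> s) &&& 0x7f := by
  have h127 : (0x7f : Nat) = 2 ^ 7 - 1 := by norm_num
  rw [h127, Nat.and_two_pow_sub_one_eq_mod, Nat.and_two_pow_sub_one_eq_mod,
    Nat.shiftRight_eq_div_pow, Nat.shiftRight_eq_div_pow]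
  have hm : (2 : Nat) ^ m = 2 ^ s * 2 ^ (m - s) := by rw [← pow_add]; congr 1; omega
  rw [hm, Nat.mod_mul_right_div_self]
  exact Nat.mod_mod_of_dvd _ (pow_dvd_pow 2 (by omega))

lemma pv_shr_small (V T : Nat) (h : V < 2 ^ (T + 7)) : (V >>> T) &&& 0x7f = V >>> T := by
  have hlt : V >>> T < 2 ^ 7 := by
    rw [Nat.shiftRight_eq_div_pow]
    apply Nat.div_lt_of_lt_mul
    rw [← pow_add]
    exact h
  have h127 : (0x7f : Nat) = 2 ^ 7 - 1 := by norm_num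
  rw [h127, Nat.and_two_pow_sub_one_eq_mod]
  exact Nat.mod_eq_of_lt hlt

lemma pvEmit_step (V T' : Nat) (h8 : 8 ≤ T') (hV : V < 2 ^ (T' + 7)) :
    pvEmit V (T' + 7) = Char.ofNat (V >>> T') :: pvEmit (V % 2 ^ T') T' := by
  have hr : (T' + 7 - 1) % 7 + 1 = (T' - 1) % 7 + 1 := by omega
  have hnum : (T' + 7 - ((T' - 1) % 7 + 1)) / 7
      = (T' - ((T' - 1) % 7 + 1)) / 7 + 1 := by omega
  unfold pvEmit
  rw [hr, hnum, List.range_succ_eq_map]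
  simp only [List.map_cons, List.map_map, List.cons_append]
  congr 1
  · have h0 : T' + 7 - 7 * (0 + 1) = T' := by omega
    rw [h0, pv_shr_small V T' hV]
  congr 1
  · apply List.map_congr_left
    intro i hi
    have hi' : i < (T' - ((T' - 1) % 7 + 1)) / 7 := List.mem_range.mp hi
    simp only [Function.comp_apply, Nat.succ_eq_add_one]
    have h1 : T' + 7 - 7 * (i + 1 + 1) = T' - 7 * (i + 1) := by omega
    rw [h1, pv_mod_shr_and V _ T' (by omega)]
  · have hrT : (T' - 1) % 7 + 1 ≤ T' := by omega
    rw [pv_andMod, pv_andMod, Nat.mod_mod_of_dvd _ (pow_dvd_pow 2 hrT)]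

lemma pv_div_high (a d m : Nat) (hd : d < 2 ^ m) : (2 ^ m * a + d) / 2 ^ m = a := by
  rw [Nat.mul_add_div (Nat.two_pow_pos m), Nat.div_eq_of_lt hd]
  omega

lemma pv_mod_high (a d m : Nat) (hd : d < 2 ^ m) : (2 ^ m * a + d) % 2 ^ m = d := by
  rw [Nat.mul_add_mod, Nat.mod_eq_of_lt hd]

lemma packLoop_spec : ∀ T buffer bitcount data out,
    8 * data.length + bitcount = T →
    data ≠ [] → bitcount ≤ 7 → buffer < 2 ^ bitcount →
    (∀ c ∈ data, c.toNat < 2 ^ 8) →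
    packLoop buffer bitcount data out = out ++ pvEmit (pvAcc buffer data) T := by
  intro T
  induction T using Nat.strong_induction_on with
  | _ T ih =>
    intro buffer bitcount data out hT hne hbc hbuf hchars
    obtain ⟨c, rest, rfl⟩ := List.exists_cons_of_ne_nil hne
    have hc : c.toNat < 2 ^ 8 := hchars c List.mem_cons_self
    have hrest : ∀ x ∈ rest, x.toNat < 2 ^ 8 := fun x hx => hchars x (List.mem_cons_of_mem _ hx)
    have e8 : (2 : Nat) ^ 8 = 256 := by norm_num
    rw [packLoop]
    by_cases h7 : bitcount < 7
    · simp only [dif_pos h7, List.headD_cons, List.tail_cons]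
      set B' := (buffer <<< 8) ||| c.toNat with hB'def
      have hB' : B' = 2 ^ 8 * buffer + c.toNat := pv_shl8_or buffer c.toNat hc
      have hbufe : buffer + 1 ≤ 2 ^ bitcount := hbuf
      have hB'lt : B' < 2 ^ (bitcount + 8) := by
        have h1 : B' < 2 ^ 8 * (buffer + 1) := by rw [hB']; omega
        have h2 : 2 ^ 8 * (buffer + 1) ≤ 2 ^ 8 * 2 ^ bitcount := Nat.mul_le_mul_left _ hbufe
        have h3 : (2 : Nat) ^ 8 * 2 ^ bitcount = 2 ^ (bitcount + 8) := by
          rw [← pow_add]; ring_nf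
        omega
      have hsub : bitcount + 8 - 7 = bitcount + 1 := by omega
      rw [hsub]
      by_cases hres : rest.length = 0
      · have hrnil : rest = [] := List.length_eq_zero_iff.mp hres
        subst hrnil
        simp only [dif_pos (by simp : ([] : List Char).length = 0)]
        have hVacc : pvAcc buffer [c] = B' := by simp [pvAcc, hB'def]
        have hTval : T = 8 + bitcount := by simpa using hT.symm
        subst hTval
        have hr : (8 + bitcount - 1) % 7 + 1 = bitcount + 1 := by omega
        have hnum2 : (8 + bitcount - (bitcount + 1)) / 7 = 1 := by omega
        have hsh : 8 + bitcount - 7 * (0 + 1) = bitcount + 1 := by omega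
        simp only [pvEmit, hVacc, hr, hnum2, List.range_one, List.map_cons, List.map_nil, hsh]
        have : (B' >>> (bitcount + 1)) &&& 0x7f = B' >>> (bitcount + 1) := by
          apply pv_shr_small
          have : bitcount + 1 + 7 = bitcount + 8 := by omega
          rw [this]; exact hB'lt
        rw [this]
        simp
      · simp only [dif_neg hres]
        have hrl : 1 ≤ rest.length := by omega
        have hT7 : 8 * rest.length + (bitcount + 1) = T - 7 := by
          simp only [List.length_cons] at hT; omega
        have hmodlt : B' % 2 ^ (bitcount + 1) < 2 ^ (bitcount + 1) :=
          Nat.mod_lt _ (Nat.two_pow_pos _)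
        have hmod : B' &&& ((1 <<< (bitcount + 1)) - 1) = B' % 2 ^ (bitcount + 1) :=
          pv_andMod B' (bitcount + 1)
        rw [hmod]
        rw [ih (T - 7) (by omega) _ _ _ _ hT7 (by simpa using hres) (by omega) hmodlt hrest]
        -- analysis of the accumulated value
        obtain ⟨hsplit, hdlt⟩ := pvAcc_split rest B' hrest
        obtain ⟨hsplit2, _⟩ := pvAcc_split rest (B' % 2 ^ (bitcount + 1)) hrest
        have hVacc : pvAcc buffer (c :: rest) = pvAcc B' rest := by
          simp [pvAcc, hB'def]
        have hpowT : (2 : Nat) ^ (T - 7) = 2 ^ (8 * rest.length) * 2 ^ (bitcount + 1) := by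
          rw [← pow_add]; congr 1; omega
        have hVlt : pvAcc B' rest < 2 ^ ((T - 7) + 7) := by
          rw [hsplit]
          calc 2 ^ (8 * rest.length) * B' + pvAcc 0 rest
              < 2 ^ (8 * rest.length) * (B' + 1) := by
                rw [Nat.mul_succ]; exact Nat.add_lt_add_left hdlt _
            _ ≤ 2 ^ (8 * rest.length) * 2 ^ (bitcount + 8) := Nat.mul_le_mul_left _ hB'lt
            _ = 2 ^ ((T - 7) + 7) := by rw [← pow_add]; congr 1; omega
        have hstep := pvEmit_step (pvAcc B' rest) (T - 7) (by omega) hVlt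
        have hTeq : T - 7 + 7 = T := by omega
        rw [hTeq] at hstep
        rw [hVacc, hstep]
        -- head char: buffer' >> (bitcount+1) is the top 7-bit chunk of V
        have hdiv : pvAcc B' rest >>> (T - 7) = B' >>> (bitcount + 1) := by
          rw [Nat.shiftRight_eq_div_pow, Nat.shiftRight_eq_div_pow, hsplit, hpowT,
            ← Nat.div_div_eq_div_mul, pv_div_high _ _ _ hdlt]
        -- masked buffer continues as V mod 2^(T-7)
        have hdecomp : B' = 2 ^ (bitcount + 1) * (B' / 2 ^ (bitcount + 1))
            + B' % 2 ^ (bitcount + 1) := (Nat.div_add_mod B' (2 ^ (bitcount + 1))).symm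
        have hremlt : 2 ^ (8 * rest.length) * (B' % 2 ^ (bitcount + 1)) + pvAcc 0 rest
            < 2 ^ (T - 7) := by
          have h1 : 2 ^ (8 * rest.length) * (B' % 2 ^ (bitcount + 1)) + pvAcc 0 rest
              < 2 ^ (8 * rest.length) * (B' % 2 ^ (bitcount + 1) + 1) := by
            rw [Nat.mul_succ]; exact Nat.add_lt_add_left hdlt _
          have h2 : 2 ^ (8 * rest.length) * (B' % 2 ^ (bitcount + 1) + 1)
              ≤ 2 ^ (8 * rest.length) * 2 ^ (bitcount + 1) := Nat.mul_le_mul_left _ hmodlt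
          rw [hpowT]; omega
        have hkey : 2 ^ (8 * rest.length) * B' + pvAcc 0 rest
            = 2 ^ (T - 7) * (B' / 2 ^ (bitcount + 1))
              + (2 ^ (8 * rest.length) * (B' % 2 ^ (bitcount + 1)) + pvAcc 0 rest) := by
          conv_lhs => rw [hdecomp]
          rw [hpowT]; ring
        have hmodeq : pvAcc (B' % 2 ^ (bitcount + 1)) rest = pvAcc B' rest % 2 ^ (T - 7) := by
          rw [hsplit2, hsplit, hkey, pv_mod_high _ _ _ hremlt]
        rw [hmodeq, hdiv]
        simp
    · -- bitcount = 7: flush the full chunk without consuming input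
      have hbc7 : bitcount = 7 := by omega
      subst hbc7
      simp only [dif_neg h7, dif_neg (by simp : ¬((c :: rest).length = 0))]
      have hz : (7 : Nat) - 7 = 0 := by omega
      rw [hz]
      have hmod : buffer &&& ((1 <<< 0) - 1) = 0 := by
        rw [pv_andMod]; omega
      rw [hmod]
      have hlen : (c :: rest).length = rest.length + 1 := by simp
      have hT7 : 8 * (c :: rest).length + 0 = T - 7 := by omega
      rw [ih (T - 7) (by omega) _ _ _ _ hT7 hne (by omega) (by norm_num) hchars]
      obtain ⟨hsplit, hdlt⟩ := pvAcc_split (c :: rest) buffer hchars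
      have hVlt : pvAcc buffer (c :: rest) < 2 ^ ((T - 7) + 7) := by
        rw [hsplit]
        calc 2 ^ (8 * (c :: rest).length) * buffer + pvAcc 0 (c :: rest)
            < 2 ^ (8 * (c :: rest).length) * (buffer + 1) := by
              rw [Nat.mul_succ]; exact Nat.add_lt_add_left hdlt _
          _ ≤ 2 ^ (8 * (c :: rest).length) * 2 ^ 7 := Nat.mul_le_mul_left _ hbuf
          _ = 2 ^ ((T - 7) + 7) := by rw [← pow_add]; congr 1; omega
      have hstep := pvEmit_step (pvAcc buffer (c :: rest)) (T - 7) (by omega) hVlt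
      have hTeq : T - 7 + 7 = T := by omega
      rw [hTeq] at hstep
      rw [hstep]
      have hTlen : (2 : Nat) ^ (T - 7) = 2 ^ (8 * (c :: rest).length) := by congr 1; omega
      have hdiv : pvAcc buffer (c :: rest) >>> (T - 7) = buffer := by
        rw [Nat.shiftRight_eq_div_pow, hsplit, hTlen, pv_div_high _ _ _ hdlt]
      have hmodeq : pvAcc 0 (c :: rest) = pvAcc buffer (c :: rest) % 2 ^ (T - 7) := by
        rw [hsplit, hTlen, pv_mod_high _ _ _ hdlt]
      rw [hdiv, ← hmodeq]
      simp [Nat.shiftRight_zero]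

lemma pack_7bit_alt_emit (data : String) :
    pack_7bit_alt data
      = String.mk (pvEmit (pvAcc 0 data.toList) (8 * data.toList.length)) := by
  have hr : ∀ m : Nat, (8 * m - 1) % 7 = (m - 1) % 7 := fun m => by omega
  simp [pack_7bit_alt, pvEmit, pvAcc, hr]

-- ===== VERDICT (by name: the statement is the Claim_ definition above) =====
theorem pack_7bit_spec : Claim_equal_pack_7bit := by
  unfold Claim_equal_pack_7bit Spec_pack_7bit
  intro data hdom hpre
  have hchars : ∀ c ∈ data.toList, c.toNat < 2 ^ 8 := by
    intro c hc
    have := (List.all_eq_true.mp hdom) c hc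
    simp only [pvDomChar, Bool.or_eq_true, Bool.and_eq_true, decide_eq_true_eq,
      beq_iff_eq] at this
    omega
  have hloop := packLoop_spec (8 * data.toList.length + 0) 0 0 data.toList [] rfl hpre
    (by norm_num) (by norm_num) hchars
  rw [pack_7bit, hloop, pack_7bit_alt_emit]
  simp
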